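-- pv_equiv track=rewrite | github.com/chiefmky/Algo-and-DS-problems | highestProfit.py | max_supply_profit_map
-- ===== SOURCE A (Python) =====
-- def max_supply_profit_map(num_suppliers, inventory, order):
--     profit = dict()
--     for price in inventory:
--         profit[price] = profit.get(price, 0) + 1
--
--     curr_max = max(profit.items(), key=lambda x: x[0])[0]
--
--     ret = 0
--     while order > 0:
--         maxi = min(order, profit[curr_max])
--         ret += curr_max * maxi
--         order -= maxi
--         profit[curr_max] -= maxi
--         profit[curr_max - 1] = profit.get(curr_max - 1, 0) + maxi
--         if profit[curr_max] == 0: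
--             del profit[curr_max]
--             curr_max -= 1
--
--     return ret
-- ===== SOURCE B (Python) =====
-- def max_supply_profit_map(num_suppliers, inventory, order):
--     counts = {}
--     for p in inventory:
--         counts[p] = counts.get(p, 0) + 1
--     prices = sorted(counts, reverse=True)
--     ret = 0
--     c = 0
--     for i, p in enumerate(prices):
--         c += counts[p]
--         if order <= 0:
--             break
--         if i + 1 < len(prices):
--             full = p - prices[i + 1]
--             if order >= c * full:
--                 # sell the whole segment: c units at each of prices p, p-1, ..., p-full+1
--                 ret += c * (full * p - full * (full - 1) // 2)
--                 order -= c * full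
--                 continue
--         # order runs out within this (or the unbounded final) segment
--         k, r = divmod(order, c)
--         ret += c * (k * p - k * (k - 1) // 2) + r * (p - k)
--         order = 0
--     return ret
-- ===== Notes on version B (the rewrite author's own statement) =====
-- stated objective: alternative
-- what changed: A simulates the sale one price level per iteration with a mutable counter dict; B sorts the distinct prices once and handles each constant-count segment in one step with an arithmetic-series closed form, using order//count and a remainder term where the order runs out.
import Mathlib
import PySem

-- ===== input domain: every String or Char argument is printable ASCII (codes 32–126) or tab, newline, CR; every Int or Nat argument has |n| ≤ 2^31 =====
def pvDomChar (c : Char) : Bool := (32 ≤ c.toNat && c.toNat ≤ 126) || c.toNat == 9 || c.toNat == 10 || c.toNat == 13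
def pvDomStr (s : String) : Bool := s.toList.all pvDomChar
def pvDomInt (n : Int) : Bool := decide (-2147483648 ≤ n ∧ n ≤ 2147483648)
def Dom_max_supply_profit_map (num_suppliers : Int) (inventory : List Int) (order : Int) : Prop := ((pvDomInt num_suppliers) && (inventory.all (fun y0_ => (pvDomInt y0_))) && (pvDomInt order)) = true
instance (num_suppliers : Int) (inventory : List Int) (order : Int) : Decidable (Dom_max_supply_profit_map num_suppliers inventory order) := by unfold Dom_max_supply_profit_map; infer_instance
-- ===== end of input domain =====

-- B replaces A's one-level-at-a-time selling loop over a mutable counter dict by a single pass over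
-- the sorted distinct prices with an arithmetic-series closed form per constant-count segment.

-- ===== PORT A =====
-- A's while-loop.  `fuel` only makes the recursion structural: each executed iteration decreases
-- `order` by at least 1 on every state A reaches, so `order.toNat` fuel is never exhausted.
def pvLoopA (fuel : Nat) (profit : PySem.Dict Int Int) (curr_max order ret : Int) : Int :=
  match fuel with
  | 0 => ret
  | Nat.succ f =>
    if order > 0 then
      let c := profit.getD curr_max 0   -- profit[curr_max]; the key is present on every state A reaches
      let maxi := min order c
      let ret' := ret + curr_max * maxi
      let order' := order - maxi
      let d1 := profit.insert curr_max (c - maxi)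
      let d2 := d1.insert (curr_max - 1) (d1.getD (curr_max - 1) 0 + maxi)
      if d2.getD curr_max 0 == 0 then
        pvLoopA f (d2.erase curr_max) (curr_max - 1) order' ret'
      else
        pvLoopA f d2 curr_max order' ret'
    else ret

def max_supply_profit_map (num_suppliers : Int) (inventory : List Int) (order : Int) : Int :=
  let profit := inventory.foldl (fun d price => d.insert price (d.getD price 0 + 1)) PySem.Dict.empty
  -- max(profit.items(), key=lambda x: x[0])[0]; none = ValueError (empty inventory, excluded by Pre_)
  match PySem.List.max? profit.items (fun x => x.1) with
  | none => 0
  | some m => pvLoopA order.toNat profit m.1 order 0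

-- ===== PORT B =====
-- B's for-loop over the sorted distinct prices, with cumulative count c and lookahead at rest.head.
def pvSegs (counts : PySem.Dict Int Int) : List Int → Int → Int → Int → Int
  | [], _, _, ret => ret
  | p :: rest, cAcc, order, ret =>
    let c := cAcc + counts.getD p 0
    if order ≤ 0 then ret
    else
      match rest with
      | nxt :: _ =>
        let full := p - nxt
        if order ≥ c * full then
          pvSegs counts rest c (order - c * full)
            (ret + c * (full * p - PySem.Int.floordiv (full * (full - 1)) 2))
        else
          let k := PySem.Int.floordiv order c
          let r := PySem.Int.mod order c
          ret + (c * (k * p - PySem.Int.floordiv (k * (k - 1)) 2) + r * (p - k))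
      | [] =>
        let k := PySem.Int.floordiv order c
        let r := PySem.Int.mod order c
        ret + (c * (k * p - PySem.Int.floordiv (k * (k - 1)) 2) + r * (p - k))

def max_supply_profit_map_alt (num_suppliers : Int) (inventory : List Int) (order : Int) : Int :=
  let counts := inventory.foldl (fun d p => d.insert p (d.getD p 0 + 1)) PySem.Dict.empty
  let prices := PySem.List.sorted counts.keys (fun x => x) true
  pvSegs counts prices 0 order 0

-- ===== PRECONDITION & SPEC =====
-- Pre_ excludes only the empty inventory, on which A's `max(profit.items(), ...)` raises ValueError.
def Pre_max_supply_profit_map (num_suppliers : Int) (inventory : List Int) (order : Int) : Prop :=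
  inventory ≠ []
instance (num_suppliers : Int) (inventory : List Int) (order : Int) : Decidable (Pre_max_supply_profit_map num_suppliers inventory order) := by unfold Pre_max_supply_profit_map; infer_instance

def pvWitness_max_supply_profit_map : Int × List Int × Int := (2, [3, 1, 3], 5)

def Spec_max_supply_profit_map (num_suppliers : Int) (inventory : List Int) (order : Int) (out : Int) : Prop := out = max_supply_profit_map_alt num_suppliers inventory order
instance (num_suppliers : Int) (inventory : List Int) (order : Int) (out : Int) : Decidable (Spec_max_supply_profit_map num_suppliers inventory order out) := by unfold Spec_max_supply_profit_map; infer_instance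

-- ===== CLAIM (what is proved, stated in full; the proofs are below) =====
def Claim_equal_max_supply_profit_map : Prop := ∀ (num_suppliers : Int) (inventory : List Int) (order : Int), Dom_max_supply_profit_map num_suppliers inventory order → Pre_max_supply_profit_map num_suppliers inventory order → Spec_max_supply_profit_map num_suppliers inventory order (max_supply_profit_map num_suppliers inventory order)

-- ===== LEMMAS AND PROOFS =====

-- number of inventory entries with value ≥ q
def pvCntGe (inv : List Int) (q : Int) : Int := ((inv.filter (fun x => decide (q ≤ x))).length : Int)

-- reference greedy process: sell min(order, #items ≥ q) units at price q, then continue at q-1.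
-- (`max 1` only forces termination; it is invisible whenever pvCntGe inv q ≥ 1, the proved case.)
def pvSim (inv : List Int) (q o : Int) : Int :=
  if h : 0 < o then
    let m := min o (max 1 (pvCntGe inv q))
    q * m + pvSim inv (q - 1) (o - m)
  else 0
termination_by o.toNat
decreasing_by
  have h1 : 1 ≤ min o (max 1 (pvCntGe inv q)) := le_min h (le_max_left _ _)
  have h2 : min o (max 1 (pvCntGe inv q)) ≤ o := min_le_left _ _
  omega

theorem pvSim_zero (inv : List Int) (q o : Int) (h : o ≤ 0) : pvSim inv q o = 0 := by
  rw [pvSim]; simp [show ¬ (0 < o) by omega]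

theorem pvSim_step (inv : List Int) (q o : Int) (ho : 0 < o) (hc : 1 ≤ pvCntGe inv q) :
    pvSim inv q o = q * min o (pvCntGe inv q) + pvSim inv (q - 1) (o - min o (pvCntGe inv q)) := by
  rw [pvSim]; simp [ho, max_eq_right hc]

theorem pvCntGe_split (inv : List Int) (q : Int) :
    pvCntGe inv q = pvCntGe inv (q + 1) + inv.count q := by
  induction inv with
  | nil => rfl
  | cons x t ih =>
    simp only [pvCntGe, ← List.countP_eq_length_filter, List.countP_cons, List.count_cons] at *
    by_cases h1 : q ≤ x <;> by_cases h2 : q + 1 ≤ x <;> by_cases h3 : x = q <;>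
      simp_all <;> omega

theorem pvCntGe_mono (inv : List Int) (q q' : Int) (h : q ≤ q') :
    pvCntGe inv q' ≤ pvCntGe inv q := by
  simp only [pvCntGe, ← List.countP_eq_length_filter]
  have := List.countP_mono_left (l := inv)
    (p := fun x => decide (q' ≤ x)) (q := fun x => decide (q ≤ x))
    (fun a _ ha => by simp_all; omega)
  exact_mod_cast this

theorem pvCntGe_pos (inv : List Int) (q x : Int) (hx : x ∈ inv) (h : q ≤ x) :
    1 ≤ pvCntGe inv q := by
  simp only [pvCntGe, ← List.countP_eq_length_filter]
  have : 0 < inv.countP (fun y => decide (q ≤ y)) :=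
    List.countP_pos_iff.mpr ⟨x, hx, by simpa⟩
  exact_mod_cast this

theorem pvCntGe_congr (inv : List Int) (q q' : Int)
    (h : ∀ x ∈ inv, (q ≤ x ↔ q' ≤ x)) : pvCntGe inv q = pvCntGe inv q' := by
  simp only [pvCntGe]
  rw [List.filter_congr (fun a ha => decide_eq_decide.mpr (h a ha))]

theorem pvCntGe_zero (inv : List Int) (q : Int) (h : ∀ x ∈ inv, x < q) :
    pvCntGe inv q = 0 := by
  simp only [pvCntGe, ← List.countP_eq_length_filter]
  have : inv.countP (fun x => decide (q ≤ x)) = 0 :=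
    List.countP_eq_zero.mpr (fun a ha => by simpa using by have := h a ha; omega)
  simp [this]

-- dict.erase leaves other keys alone
theorem pv_find?_filter_ne (k k' : Int) (h : k' ≠ k) (l : List (Int × Int)) :
    (l.filter (fun p => !(p.1 == k))).find? (fun p => p.1 == k') = l.find? (fun p => p.1 == k') := by
  induction l with
  | nil => rfl
  | cons a t ih =>
    by_cases ha : a.1 = k
    · have h1 : (a.1 == k') = false := by simp [ha, Ne.symm h]
      simp [List.filter_cons, ha, List.find?_cons, h1, ih, beq_iff_eq, Ne.symm h, h]
    · by_cases hb : a.1 = k'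
      · simp [List.filter_cons, ha, List.find?_cons, hb, h]
      · simp [List.filter_cons, ha, List.find?_cons, hb, ih, h]

theorem pv_getD_erase_of_ne (d : PySem.Dict Int Int) (k k' d0 : Int) (h : k' ≠ k) :
    (d.erase k).getD k' d0 = d.getD k' d0 := by
  simp only [PySem.Dict.getD, PySem.Dict.get?, PySem.Dict.erase,
    pv_find?_filter_ne k k' h d.items]

theorem pvLoopA_nonpos (f : Nat) (d : PySem.Dict Int Int) (q o r : Int) (h : o ≤ 0) :
    pvLoopA f d q o r = r := by
  cases f <;> simp [pvLoopA, show ¬ o > 0 by omega]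

-- A's loop equals the reference process (dict invariant)
theorem pvLoopA_eq_sim (inv : List Int) (fuel : Nat) :
    ∀ (d : PySem.Dict Int Int) (q o r : Int),
    o.toNat ≤ fuel →
    d.getD q 0 = pvCntGe inv q →
    (∀ p : Int, p < q → d.getD p 0 = (inv.count p : Int)) →
    1 ≤ pvCntGe inv q →
    pvLoopA fuel d q o r = r + pvSim inv q o := by
  induction fuel with
  | zero =>
    intro d q o r hf hq hlt hpos
    rw [pvSim_zero inv q o (by omega)]
    simp [pvLoopA]
  | succ f ih =>
    intro d q o r hf hq hlt hpos
    by_cases ho : 0 < o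
    · rw [pvSim_step inv q o ho hpos]
      simp only [pvLoopA, hq, gt_iff_lt, ho, if_pos]
      have hne1 : (q : Int) - 1 ≠ q := by omega
      have hne1' : (q : Int) ≠ q - 1 := by omega
      set C := pvCntGe inv q with hC
      set M := min o C with hM
      have hd2q : ((d.insert q (C - M)).insert (q - 1)
          ((d.insert q (C - M)).getD (q - 1) 0 + M)).getD q 0 = C - M := by
        rw [PySem.Dict.getD_insert, PySem.Dict.getD_insert]
        simp [hne1']
      rw [hd2q]
      by_cases hz : C - M = 0
      · have hMC : M = C := by omega
        have hstep : pvLoopA f (((d.insert q (C - M)).insert (q - 1)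
            ((d.insert q (C - M)).getD (q - 1) 0 + M)).erase q) (q - 1) (o - M) (r + q * M)
            = (r + q * M) + pvSim inv (q - 1) (o - M) := by
          apply ih
          · have : 1 ≤ M := by omega
            omega
          · rw [pv_getD_erase_of_ne _ _ _ _ hne1]
            simp only [PySem.Dict.getD_insert, eq_self_iff_true, if_true, if_neg hne1]
            have hcnt := hlt (q - 1) (by omega)
            have hsp := pvCntGe_split inv (q - 1)
            have hq1 : q - 1 + 1 = q := by ring
            rw [hq1] at hsp
            omega
          · intro p hp
            rw [pv_getD_erase_of_ne _ _ _ _ (by omega)]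
            simp only [PySem.Dict.getD_insert,
              if_neg (show p ≠ q - 1 by omega), if_neg (show p ≠ q by omega)]
            exact hlt p (by omega)
          · exact le_trans hpos (pvCntGe_mono inv (q - 1) q (by omega))
        have hcond : ((C - M : Int) == 0) = true := by simp [hz]
        rw [hcond, if_pos rfl, hstep]; ring
      · have hMo : M = o := by omega
        have hcond : ((C - M : Int) == 0) = false := by simp [hz]
        rw [hcond, if_neg (by simp)]
        rw [pvLoopA_nonpos _ _ _ _ _ (by omega),
          pvSim_zero inv (q - 1) (o - M) (by omega)]
        ring
    · rw [pvSim_zero inv q o (by omega)]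
      simp [pvLoopA, show ¬ o > 0 by omega]

-- closed form: k = o // c full levels and a remainder of o % c at price q - k
theorem pvSim_closed (inv : List Int) (ℓ : Nat) :
    ∀ (q o c : Int), 1 ≤ c → 0 ≤ o → o ≤ c * ℓ →
    (∀ q' : Int, q - ℓ < q' → q' ≤ q → pvCntGe inv q' = c) →
    pvSim inv q o = c * (o / c * q - (o / c * (o / c - 1)) / 2) + o % c * (q - o / c) := by
  induction ℓ with
  | zero =>
    intro q o c hc ho hole hrange
    have h0 : o = 0 := by push_cast at hole; omega
    subst h0
    rw [pvSim_zero inv q 0 le_rfl]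
    norm_num
  | succ n ih =>
    intro q o c hc ho hole hrange
    by_cases ho0 : 0 < o
    · have hcq : pvCntGe inv q = c := hrange q (by push_cast; omega) le_rfl
      rw [pvSim_step inv q o ho0 (by omega), hcq]
      by_cases hoc : o < c
      · have hk : o / c = 0 := Int.ediv_eq_zero_of_lt ho hoc
        have hr : o % c = o := Int.emod_eq_of_lt ho hoc
        rw [show min o c = o by omega, pvSim_zero inv (q - 1) (o - o) (by omega), hk, hr]
        norm_num
        ring
      · rw [show min o c = c by omega]
        rw [ih (q - 1) (o - c) c hc (by omega) (by push_cast at hole ⊢; linarith [show c * ((n:Int)+1) = c * (n:Int) + c from by ring])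
          (fun q' h1 h2 => hrange q' (by push_cast at h1 ⊢; omega) (by omega))]
        have hk' : (o - c) / c = o / c - 1 := by
          have h := Int.add_mul_ediv_right o (-1) (show c ≠ 0 by omega)
          rw [show o + -1 * c = o - c by ring] at h
          omega
        rw [hk', Int.sub_emod_right]
        set k := o / c with hkdef
        obtain ⟨u, hu⟩ := Int.even_mul_succ_self (k - 1)
        obtain ⟨v, hv⟩ := Int.even_mul_succ_self (k - 2)
        have hu2 : k * (k - 1) = 2 * u := by rw [show k * (k-1) = (k-1) * ((k-1)+1) by ring, hu]; ring
        have hv2 : (k - 1) * (k - 1 - 1) = 2 * v := by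
          rw [show (k-1) * (k-1-1) = (k-2) * ((k-2)+1) by ring, hv]; ring
        have ht1 : k * (k - 1) / 2 = u := by
          rw [hu2]; exact Int.mul_ediv_cancel_left u (by norm_num)
        have ht2 : (k - 1) * (k - 1 - 1) / 2 = v := by
          rw [hv2]; exact Int.mul_ediv_cancel_left v (by norm_num)
        have huv : u = v + (k - 1) := by
          have hd : k * (k - 1) - (k - 1) * (k - 1 - 1) = 2 * (k - 1) := by ring
          omega
        rw [ht1, ht2, huv]
        ring
    · have h0 : o = 0 := by omega
      subst h0
      rw [pvSim_zero inv q 0 le_rfl]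
      norm_num

-- a full constant-count segment of length ℓ
theorem pvSim_seg (inv : List Int) (ℓ : Nat) :
    ∀ (q o c : Int), 1 ≤ c → c * ℓ ≤ o →
    (∀ q' : Int, q - ℓ < q' → q' ≤ q → pvCntGe inv q' = c) →
    pvSim inv q o = c * ((ℓ : Int) * q - ((ℓ : Int) * ((ℓ : Int) - 1)) / 2)
      + pvSim inv (q - ℓ) (o - c * ℓ) := by
  induction ℓ with
  | zero =>
    intro q o c hc hole hrange
    norm_num
  | succ n ih =>
    intro q o c hc hole hrange
    push_cast at hole hrange ⊢
    have hcn : c * ((n : Int) + 1) = c * (n : Int) + c := by ring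
    have hcn0 : 0 ≤ c * (n : Int) := by positivity
    have hole' : c * (n : Int) + c ≤ o := by linarith
    have ho0 : 0 < o := by omega
    have hcq : pvCntGe inv q = c := hrange q (by omega) le_rfl
    rw [pvSim_step inv q o ho0 (by omega), hcq, show min o c = c by omega]
    rw [ih (q - 1) (o - c) c hc (by linarith)
      (fun q' h1 h2 => hrange q' (by omega) (by omega))]
    rw [show q - 1 - (n : Int) = q - ((n : Int) + 1) by ring,
      show o - c - c * (n : Int) = o - c * ((n : Int) + 1) by ring]
    set N := (n : Int) with hN
    obtain ⟨u, hu⟩ := Int.even_mul_succ_self N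
    obtain ⟨v, hv⟩ := Int.even_mul_succ_self (N - 1)
    have hu2 : (N + 1) * (N + 1 - 1) = 2 * u := by rw [show (N+1) * (N+1-1) = N * (N+1) by ring, hu]; ring
    have hv2 : N * (N - 1) = 2 * v := by rw [show N * (N-1) = (N-1) * ((N-1)+1) by ring, hv]; ring
    have ht1 : (N + 1) * (N + 1 - 1) / 2 = u := by
      rw [hu2]; exact Int.mul_ediv_cancel_left u (by norm_num)
    have ht2 : N * (N - 1) / 2 = v := by
      rw [hv2]; exact Int.mul_ediv_cancel_left v (by norm_num)
    have huv : u = v + N := by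
      have hd : (N + 1) * (N + 1 - 1) - N * (N - 1) = 2 * N := by ring
      omega
    rw [ht1, ht2, huv]
    ring

-- closed form stated with Python's // and %
theorem pvSim_closed' (inv : List Int) (p o c L : Int) (hc : 1 ≤ c) (ho : 0 ≤ o)
    (hL : o ≤ c * L)
    (hrange : ∀ q' : Int, p - L < q' → q' ≤ p → pvCntGe inv q' = c) :
    pvSim inv p o = c * (PySem.Int.floordiv o c * p
        - PySem.Int.floordiv (PySem.Int.floordiv o c * (PySem.Int.floordiv o c - 1)) 2)
      + PySem.Int.mod o c * (p - PySem.Int.floordiv o c) := by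
  have hL0 : 0 ≤ L := by nlinarith
  rw [PySem.Int.floordiv_eq_ediv_of_pos (by omega), PySem.Int.mod_eq_emod_of_pos (by omega),
    PySem.Int.floordiv_eq_ediv_of_pos (show (0:Int) < 2 by norm_num)]
  exact pvSim_closed inv L.toNat p o c hc ho
    (by rw [Int.toNat_of_nonneg hL0]; exact hL)
    (fun q' h1 h2 => hrange q' (by rw [Int.toNat_of_nonneg hL0] at h1; exact h1) h2)

-- one-step unfoldings of pvSegs (rw-once versions)
theorem pvSegs_single (counts : PySem.Dict Int Int) (p cAcc o ret : Int) :
    pvSegs counts [p] cAcc o ret =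
      if o ≤ 0 then ret
      else ret + ((cAcc + counts.getD p 0)
          * (PySem.Int.floordiv o (cAcc + counts.getD p 0) * p
            - PySem.Int.floordiv (PySem.Int.floordiv o (cAcc + counts.getD p 0)
                * (PySem.Int.floordiv o (cAcc + counts.getD p 0) - 1)) 2)
        + PySem.Int.mod o (cAcc + counts.getD p 0)
          * (p - PySem.Int.floordiv o (cAcc + counts.getD p 0))) := rfl

theorem pvSegs_cons2 (counts : PySem.Dict Int Int) (p nxt : Int) (rest' : List Int)
    (cAcc o ret : Int) :
    pvSegs counts (p :: nxt :: rest') cAcc o ret =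
      if o ≤ 0 then ret
      else if o ≥ (cAcc + counts.getD p 0) * (p - nxt) then
        pvSegs counts (nxt :: rest') (cAcc + counts.getD p 0)
          (o - (cAcc + counts.getD p 0) * (p - nxt))
          (ret + (cAcc + counts.getD p 0) * ((p - nxt) * p
            - PySem.Int.floordiv ((p - nxt) * ((p - nxt) - 1)) 2))
      else
        ret + ((cAcc + counts.getD p 0)
            * (PySem.Int.floordiv o (cAcc + counts.getD p 0) * p
              - PySem.Int.floordiv (PySem.Int.floordiv o (cAcc + counts.getD p 0)
                  * (PySem.Int.floordiv o (cAcc + counts.getD p 0) - 1)) 2)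
          + PySem.Int.mod o (cAcc + counts.getD p 0)
            * (p - PySem.Int.floordiv o (cAcc + counts.getD p 0))) := rfl

-- B's loop equals the reference process
theorem pvSegs_eq_sim (inv : List Int) :
    ∀ (rest : List Int) (p cAcc o ret : Int),
    (p :: rest).Pairwise (· > ·) →
    (∀ x ∈ inv, x ≤ p → x ∈ p :: rest) →
    (∀ x ∈ p :: rest, x ∈ inv) →
    cAcc = pvCntGe inv (p + 1) →
    pvSegs (PySem.Dict.counter inv) (p :: rest) cAcc o ret = ret + pvSim inv p o := by
  intro rest
  induction rest with
  | nil =>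
    intro p cAcc o ret hsort hcover hmem hacc
    rw [pvSegs_single, PySem.Dict.getD_counter]
    have hsp := pvCntGe_split inv p
    have hcp : cAcc + (inv.count p : Int) = pvCntGe inv p := by omega
    rw [hcp]
    by_cases ho : o ≤ 0
    · rw [if_pos ho, pvSim_zero inv p o ho]; ring
    · rw [if_neg ho]
      have hpos : 1 ≤ pvCntGe inv p :=
        pvCntGe_pos inv p p (hmem p (by simp)) le_rfl
      have hall : ∀ x ∈ inv, p ≤ x := by
        intro x hx
        by_contra h
        have hxm := hcover x hx (by omega)
        simp at hxm
        omega
      rw [pvSim_closed' inv p o (pvCntGe inv p) o hpos (by omega) (by nlinarith)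
        (fun q' h1 h2 => pvCntGe_congr inv q' p
          (fun x hx => by have := hall x hx; constructor <;> intro <;> omega))]
  | cons nxt rest' ih =>
    intro p cAcc o ret hsort hcover hmem hacc
    rw [pvSegs_cons2, PySem.Dict.getD_counter]
    obtain ⟨hhead, htail⟩ := List.pairwise_cons.mp hsort
    have hpn : nxt < p := hhead nxt (by simp)
    have hsp := pvCntGe_split inv p
    have hcp : cAcc + (inv.count p : Int) = pvCntGe inv p := by omega
    rw [hcp]
    have hle_nxt : ∀ x ∈ nxt :: rest', x ≤ nxt := by
      intro x hx
      rcases List.mem_cons.mp hx with h | h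
      · omega
      · have := (List.pairwise_cons.mp htail).1 x h; omega
    have hrange : ∀ q' : Int, nxt < q' → q' ≤ p → pvCntGe inv q' = pvCntGe inv p := by
      intro q' h1 h2
      apply pvCntGe_congr
      intro x hx
      constructor
      · intro hq'x
        by_contra hpx
        have hxm := hcover x hx (by omega)
        rcases List.mem_cons.mp hxm with h | h
        · omega
        · have := hle_nxt x h; omega
      · intro hpx; omega
    have hpos : 1 ≤ pvCntGe inv p :=
      pvCntGe_pos inv p p (hmem p (by simp)) le_rfl
    by_cases ho : o ≤ 0
    · rw [if_pos ho, pvSim_zero inv p o ho]; ring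
    · rw [if_neg ho]
      by_cases hge : o ≥ pvCntGe inv p * (p - nxt)
      · rw [if_pos hge]
        have hLnn : (0:Int) ≤ p - nxt := by omega
        have hcast : ((p - nxt).toNat : Int) = p - nxt := Int.toNat_of_nonneg hLnn
        have hseg := pvSim_seg inv (p - nxt).toNat p o (pvCntGe inv p) hpos
          (by rw [hcast]; omega)
          (fun q' h1 h2 => hrange q' (by rw [hcast] at h1; omega) h2)
        rw [hcast] at hseg
        rw [ih nxt (pvCntGe inv p) (o - pvCntGe inv p * (p - nxt))
          (ret + pvCntGe inv p * ((p - nxt) * p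
            - PySem.Int.floordiv ((p - nxt) * ((p - nxt) - 1)) 2))
          htail
          (fun x hx hxle => by
            have hxm := hcover x hx (by omega)
            rcases List.mem_cons.mp hxm with h | h
            · omega
            · exact h)
          (fun x hx => hmem x (List.mem_cons_of_mem p hx))
          ((hrange (nxt + 1) (by omega) (by omega)).symm)]
        rw [hseg, show p - (p - nxt) = nxt from by ring,
          PySem.Int.floordiv_eq_ediv_of_pos (show (0:Int) < 2 by norm_num)]
        ring
      · rw [if_neg hge]
        rw [pvSim_closed' inv p o (pvCntGe inv p) (p - nxt) hpos (by omega)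
          (by omega) (fun q' h1 h2 => hrange q' (by omega) h2)]

-- ===== VERDICT (by name: the statement is the Claim_ definition above) =====
theorem max_supply_profit_map_spec : Claim_equal_max_supply_profit_map := by
  intro ns inv o _ hpre
  unfold Pre_max_supply_profit_map at hpre
  unfold Spec_max_supply_profit_map
  simp only [max_supply_profit_map, max_supply_profit_map_alt,
    PySem.Dict.foldl_insert_getD_add_one_eq_counter]
  -- the maximal key (A's start)
  rcases hmax : PySem.List.max? (PySem.Dict.counter inv).items (fun x => x.1) with _ | m
  · exfalso
    have hnil := (PySem.List.max?_eq_none_iff _ _).mp hmax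
    rcases List.exists_mem_of_ne_nil inv hpre with ⟨x, hx⟩
    have hxk : x ∈ (PySem.Dict.counter inv).keys := by
      rw [PySem.Dict.keys_counter]
      exact (PySem.Set.mem_ofList _ _).mpr hx
    have : x ∈ (PySem.Dict.counter inv).items.map (fun p => p.1) := hxk
    rw [hnil] at this
    simp at this
  · have hm_mem : m ∈ (PySem.Dict.counter inv).items := PySem.List.max?_mem hmax
    have hm_max := PySem.List.max?_isMax hmax
    have hm1_inv : m.1 ∈ inv := by
      have : m.1 ∈ (PySem.Dict.counter inv).keys := PySem.Dict.mem_keys_of_mem_items _ hm_mem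
      rw [PySem.Dict.keys_counter] at this
      exact (PySem.Set.mem_ofList _ _).mp this
    have hmax_all : ∀ x ∈ inv, x ≤ m.1 := by
      intro x hx
      have hxk : x ∈ (PySem.Dict.counter inv).keys := by
        rw [PySem.Dict.keys_counter]; exact (PySem.Set.mem_ofList _ _).mpr hx
      rcases List.mem_map.mp hxk with ⟨pr, hpr, hpr1⟩
      have := hm_max pr hpr
      simpa [hpr1] using this
    have hcnt_top : pvCntGe inv (m.1 + 1) = 0 :=
      pvCntGe_zero inv (m.1 + 1) (fun x hx => by have := hmax_all x hx; omega)
    -- A's side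
    have hA := pvLoopA_eq_sim inv o.toNat (PySem.Dict.counter inv) m.1 o 0 le_rfl
      (by
        rw [PySem.Dict.getD_counter]
        have hsp := pvCntGe_split inv m.1
        omega)
      (fun p _ => PySem.Dict.getD_counter inv p)
      (pvCntGe_pos inv m.1 m.1 hm1_inv le_rfl)
    -- B's side: the sorted distinct prices
    rcases hS : PySem.List.sorted (PySem.Dict.counter inv).keys (fun x => x) true with _ | ⟨h, t⟩
    · exfalso
      have : (PySem.Dict.counter inv).keys = [] := (PySem.List.sorted_eq_nil_iff _ _ _).mp hS
      have hxk : m.1 ∈ (PySem.Dict.counter inv).keys := PySem.Dict.mem_keys_of_mem_items _ hm_mem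
      rw [this] at hxk
      simp at hxk
    · have hperm : (h :: t).Perm (PySem.Dict.counter inv).keys := hS ▸ PySem.List.sorted_perm _ _ _
      have hmemS : ∀ x ∈ h :: t, x ∈ inv := by
        intro x hx
        have : x ∈ (PySem.Dict.counter inv).keys := hperm.mem_iff.mp hx
        rw [PySem.Dict.keys_counter] at this
        exact (PySem.Set.mem_ofList _ _).mp this
      have hcover : ∀ x ∈ inv, x ∈ h :: t := by
        intro x hx
        apply hperm.mem_iff.mpr
        rw [PySem.Dict.keys_counter]
        exact (PySem.Set.mem_ofList _ _).mpr hx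
      have hh_ge : ∀ k ∈ (PySem.Dict.counter inv).keys, k ≤ h :=
        PySem.List.key_head_sorted_rev_ge _ _ hS
      have hh_inv : h ∈ inv := hmemS h (by simp)
      have hhm : h = m.1 := by
        have h1 : h ≤ m.1 := hmax_all h hh_inv
        have h2 : m.1 ≤ h := hh_ge m.1 (PySem.Dict.mem_keys_of_mem_items _ hm_mem)
        omega
      have hnodup : (h :: t).Nodup := by
        refine hperm.nodup_iff.mpr ?_
        rw [PySem.Dict.keys_counter]
        exact PySem.Set.nodup_ofList inv
      have hpair : (h :: t).Pairwise (· > ·) := by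
        have hge : (h :: t).Pairwise (fun a b => b ≤ a) := hS ▸ PySem.List.sorted_pairwise_rev _ _
        exact (hge.and hnodup).imp (fun hab => by omega)
      have hB := pvSegs_eq_sim inv t h 0 o 0 hpair
        (fun x hx _ => hcover x hx) hmemS
        (by rw [hhm, hcnt_top])
      show pvLoopA o.toNat (PySem.Dict.counter inv) m.1 o 0
        = pvSegs (PySem.Dict.counter inv) (h :: t) 0 o 0
      rw [hA, hB, hhm]
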